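-- pv_equiv track=rewrite | github.com/chehsunliu/a | LeetCode/Medium/0128_longest-consecutive-sequence/20250220-1.ac.py | f
-- ===== SOURCE A (Python) =====
-- def f(m, num):
--     if num not in m:
--         return 0
--
--     v = m[num]
--     if v is not None:
--         return v
--
--     m[num] = 1 + f(m, num + 1)
--     return m[num]
-- ===== SOURCE B (Python) =====
-- def f(m, num):
--     # Different algorithm: filter-and-sort the uncached keys >= num, scan the
--     # sorted list once to find the chain boundary, then answer by arithmetic.
--     # Performs the same cache writes into m as A (return-value equivalence is
--     # what the Lean file proves).
--     if num not in m:
--         return 0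
--     if m[num] is not None:
--         return m[num]
--     nones = sorted(k for k, v in m.items() if v is None and k >= num)
--     expect = num
--     for k in nones:
--         if k != expect:
--             break
--         expect += 1
--     # expect is never an uncached key here, so base is never None
--     base = m[expect] if expect in m else 0
--     for k in range(num, expect):
--         m[k] = base + (expect - k)
--     return base + (expect - num)
-- ===== Notes on version B (the rewrite author's own statement) =====
-- stated objective: alternative
-- what changed: Replaces the memoized recursion by a filter-sort-scan: collect the uncached keys >= num, sort them, walk the sorted list once to find the first gap (the chain boundary), and compute the result by closed-form arithmetic base + (boundary - num), with the same cache writes done by a range loop; Pre_ excludes association lists with duplicate keys, which cannot arise from a Python dict and whose first-vs-last-match reading is ambiguous.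
import Mathlib
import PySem

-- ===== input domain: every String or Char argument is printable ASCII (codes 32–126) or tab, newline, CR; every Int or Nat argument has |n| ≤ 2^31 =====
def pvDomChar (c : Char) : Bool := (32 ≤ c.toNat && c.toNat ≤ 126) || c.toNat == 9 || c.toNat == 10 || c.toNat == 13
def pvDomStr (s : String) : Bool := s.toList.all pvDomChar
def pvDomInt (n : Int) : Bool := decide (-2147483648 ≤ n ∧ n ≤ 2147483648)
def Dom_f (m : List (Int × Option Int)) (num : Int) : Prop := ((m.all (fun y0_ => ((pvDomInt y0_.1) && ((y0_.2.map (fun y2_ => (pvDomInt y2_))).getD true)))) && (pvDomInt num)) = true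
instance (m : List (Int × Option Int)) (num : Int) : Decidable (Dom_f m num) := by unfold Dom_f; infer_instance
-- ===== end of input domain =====

-- B replaces A's memoized recursion by filter-sort-scan plus closed-form
-- arithmetic (same return value; both Pythons mutate m identically, the
-- equivalence proved here is about the RETURN value only).

-- termination measure for port A: number of keys ≥ the current index
def pvMeasure (d : PySem.Dict Int (Option Int)) (n : Int) : Nat :=
  (d.keys.filter (fun k => decide (n ≤ k))).length

-- the measure strictly decreases when n itself is a key (used by port A)
theorem pvFilter_lt (l : List Int) (n : Int) (h : n ∈ l) :
    (l.filter (fun k => decide (n + 1 ≤ k))).length <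
    (l.filter (fun k => decide (n ≤ k))).length := by
  induction l with
  | nil => cases h
  | cons a l ih =>
    have mono : (l.filter (fun k => decide (n + 1 ≤ k))).length ≤
        (l.filter (fun k => decide (n ≤ k))).length := by
      rw [← List.countP_eq_length_filter, ← List.countP_eq_length_filter]
      apply List.countP_mono_left
      intro x _ hx
      simp only [decide_eq_true_eq] at hx ⊢; omega
    rcases List.mem_cons.mp h with rfl | hm
    · rw [List.filter_cons_of_neg (by simp only [decide_eq_true_eq]; omega),
        List.filter_cons_of_pos (by simp only [decide_eq_true_eq]; omega),
        List.length_cons]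
      exact Nat.lt_succ_of_le mono
    · have hlt := ih hm
      by_cases h1 : n ≤ a
      · by_cases h2 : n + 1 ≤ a
        · rw [List.filter_cons_of_pos (by simpa using h2),
            List.filter_cons_of_pos (by simpa using h1),
            List.length_cons, List.length_cons]
          omega
        · rw [List.filter_cons_of_neg (by simpa using h2),
            List.filter_cons_of_pos (by simpa using h1),
            List.length_cons]
          omega
      · have h2 : ¬ (n + 1 ≤ a) := by omega
        rw [List.filter_cons_of_neg (by simpa using h2),
          List.filter_cons_of_neg (by simpa using h1)]
        exact hlt

theorem pvMeasure_lt (d : PySem.Dict Int (Option Int)) (n : Int)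
    (h : n ∈ d.keys) : pvMeasure d (n + 1) < pvMeasure d n :=
  pvFilter_lt d.keys n h

theorem pvMem_keys_of_get? (d : PySem.Dict Int (Option Int)) (n : Int)
    (v : Option Int) (h : d.get? n = some v) : n ∈ d.keys := by
  by_contra hne
  rw [(PySem.Dict.get?_eq_none_iff_not_mem_keys d n).mpr hne] at h
  cases h

-- ===== PORT A =====
-- recursive memoization, threading the mutated dict; returns (dict, value)
def fAux (d : PySem.Dict Int (Option Int)) (num : Int) :
    PySem.Dict Int (Option Int) × Int :=
  match h : d.get? num with
  | none => (d, 0)                      -- num not in m: return 0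
  | some (some v) => (d, v)             -- cached value: return it
  | some none =>
      let p := fAux d (num + 1)         -- f(m, num + 1) (mutates m)
      let r := 1 + p.2
      (p.1.insert num (some r), r)      -- m[num] = 1 + …; return m[num]
termination_by pvMeasure d num
decreasing_by exact pvMeasure_lt d num (pvMem_keys_of_get? d num none h)

def f (m : List (Int × Option Int)) (num : Int) : Int :=
  (fAux (PySem.Dict.mk m) num).2

-- ===== PORT B =====
-- for k in nones: if k != expect: break; expect += 1   — returns final expect
def fScanSorted : List Int → Int → Int
  | [], e => e
  | k :: rest, e => if k = e then fScanSorted rest (e + 1) else e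

def f_alt (m : List (Int × Option Int)) (num : Int) : Int :=
  let d := PySem.Dict.mk m
  if (d.get? num).isSome = false then 0          -- if num not in m: return 0
  else
    match d.get? num with
    | some (some v) => v                         -- if m[num] is not None: return m[num]
    | _ =>
      -- nones = sorted(k for k, v in m.items() if v is None and k >= num)
      let nones := PySem.List.sorted
        ((d.items.filter (fun p => p.2 == (none : Option Int) && decide (num ≤ p.1))).map (·.1))
        (fun x => x) false
      let expect := fScanSorted nones num
      -- base = m[expect] if expect in m else 0; here m[expect] is never None
      -- (proved below), so reading the impossible branch as 0 is exact
      let base : Int :=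
        match d.get? expect with
        | some (some v) => v
        | _ => 0
      -- the writes m[k] = base + (expect - k) do not affect the return value
      base + (expect - num)

-- ===== PRECONDITION & SPEC =====
-- Pre_ excludes association lists with duplicate keys, which cannot arise
-- from a Python dict and whose first-vs-last-match reading is ambiguous.
def Pre_f (m : List (Int × Option Int)) (num : Int) : Prop :=
  (m.map Prod.fst).Nodup
instance (m : List (Int × Option Int)) (num : Int) : Decidable (Pre_f m num) := by unfold Pre_f; infer_instance

def pvWitness_f : (List (Int × Option Int)) × Int := ([(0, none), (1, some 3)], 0)

def Spec_f (m : List (Int × Option Int)) (num : Int) (out : Int) : Prop := out = f_alt m num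
instance (m : List (Int × Option Int)) (num : Int) (out : Int) : Decidable (Spec_f m num out) := by unfold Spec_f; infer_instance

-- ===== CLAIM (what is proved, stated in full; the proofs are below) =====
def Claim_equal_f : Prop := ∀ (m : List (Int × Option Int)) (num : Int), Dom_f m num → Pre_f m num → Spec_f m num (f m num)

-- ===== LEMMAS AND PROOFS =====

-- abstract chain boundary: first index ≥ n whose cache entry is not None
def pvWalk (d : PySem.Dict Int (Option Int)) (n : Int) : Int :=
  match h : d.get? n with
  | some none => pvWalk d (n + 1)
  | _ => n
termination_by pvMeasure d n
decreasing_by exact pvMeasure_lt d n (pvMem_keys_of_get? d n none h)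

def pvBase (d : PySem.Dict Int (Option Int)) (t : Int) : Int :=
  match d.get? t with
  | some (some v) => v
  | _ => 0

theorem pvWalk_some_none (d : PySem.Dict Int (Option Int)) (n : Int)
    (h : d.get? n = some none) : pvWalk d n = pvWalk d (n + 1) := by
  rw [pvWalk]; split <;> simp_all

theorem pvWalk_of_not_none (d : PySem.Dict Int (Option Int)) (n : Int)
    (h : d.get? n ≠ some none) : pvWalk d n = n := by
  rw [pvWalk]; split <;> simp_all

-- A's value in terms of the abstract boundary
theorem fAux_eq_walk (d : PySem.Dict Int (Option Int)) (num : Int) :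
    (fAux d num).2 = pvBase d (pvWalk d num) + (pvWalk d num - num) := by
  fun_induction fAux d num with
  | case1 num h =>
      rw [pvWalk_of_not_none d num (by simp [h])]
      simp [pvBase, h]
  | case2 num v h =>
      rw [pvWalk_of_not_none d num (by simp [h])]
      simp [pvBase, h]
  | case3 num h p r ih =>
      rw [pvWalk_some_none d num h]
      show 1 + (fAux d (num + 1)).2 = _
      rw [ih]
      omega

-- the sorted-list scan computes the abstract boundary
theorem fScanSorted_eq_walk (d : PySem.Dict Int (Option Int)) (L : List Int)
    (e : Int) (hL : L.Pairwise (· < ·))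
    (hmem : ∀ k, k ∈ L ↔ (d.get? k = some none ∧ e ≤ k)) :
    fScanSorted L e = pvWalk d e := by
  induction L generalizing e with
  | nil =>
      have : ¬ d.get? e = some none := fun h => by
        have := (hmem e).mpr ⟨h, le_refl e⟩; cases this
      rw [fScanSorted, pvWalk_of_not_none d e this]
  | cons k rest ih =>
      rcases List.pairwise_cons.mp hL with ⟨hklt, hrest⟩
      by_cases hk : k = e
      · subst hk
        have hke : d.get? k = some none := ((hmem k).mp (List.mem_cons_self)).1
        rw [fScanSorted, if_pos rfl, pvWalk_some_none d k hke]
        apply ih (k + 1) hrest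
        intro j
        constructor
        · intro hj
          have hjl := (hmem j).mp (List.mem_cons_of_mem _ hj)
          exact ⟨hjl.1, by have := hklt j hj; omega⟩
        · rintro ⟨hjn, hjk⟩
          have hjL := (hmem j).mpr ⟨hjn, by omega⟩
          rcases List.mem_cons.mp hjL with rfl | hjr
          · omega
          · exact hjr
      · rw [fScanSorted, if_neg hk]
        refine (pvWalk_of_not_none d e (fun he => ?_)).symm
        have heL := (hmem e).mpr ⟨he, le_refl e⟩
        rcases List.mem_cons.mp heL with rfl | her
        · exact hk rfl
        · have h1 := hklt e her
          have h2 := ((hmem k).mp (List.mem_cons_self)).2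
          omega

-- membership in B's filtered key list characterises an uncached key ≥ num
theorem pvMem_filtered (d : PySem.Dict Int (Option Int)) (num j : Int)
    (hnd : d.keys.Nodup) :
    j ∈ (d.items.filter
        (fun p => p.2 == (none : Option Int) && decide (num ≤ p.1))).map (·.1) ↔
      (d.get? j = some none ∧ num ≤ j) := by
  simp only [List.mem_map, List.mem_filter, Bool.and_eq_true, beq_iff_eq,
    decide_eq_true_eq]
  constructor
  · rintro ⟨⟨k, v⟩, ⟨hmem, hv, hle⟩, rfl⟩
    subst hv
    exact ⟨PySem.Dict.get?_of_mem_items d hmem hnd, hle⟩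
  · rintro ⟨hget, hle⟩
    exact ⟨(j, none), ⟨PySem.Dict.mem_items_of_get?_eq_some d hget, rfl, hle⟩, rfl⟩

theorem pvNodup_filtered (d : PySem.Dict Int (Option Int)) (num : Int)
    (hnd : d.keys.Nodup) :
    ((d.items.filter
        (fun p => p.2 == (none : Option Int) && decide (num ≤ p.1))).map (·.1)).Nodup := by
  have hsub : (d.items.filter
      (fun p => p.2 == (none : Option Int) && decide (num ≤ p.1))).Sublist d.items :=
    List.filter_sublist
  have : ((d.items.filter
      (fun p => p.2 == (none : Option Int) && decide (num ≤ p.1))).map (·.1)).Sublist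
      (d.items.map (·.1)) := List.Sublist.map _ hsub
  exact List.Nodup.sublist this hnd

-- B's value equals A's value, on the dict
theorem f_alt_eq_walk (d : PySem.Dict Int (Option Int)) (num : Int)
    (hnd : d.keys.Nodup) :
    (let base :=
        if (d.get? num).isSome = false then (0 : Int)
        else
          match d.get? num with
          | some (some v) => v
          | _ =>
            let nones := PySem.List.sorted
              ((d.items.filter (fun p => p.2 == (none : Option Int) && decide (num ≤ p.1))).map (·.1))
              (fun x => x) false
            let expect := fScanSorted nones num
            (match d.get? expect with
              | some (some v) => v
              | _ => 0) + (expect - num)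
      base) = pvBase d (pvWalk d num) + (pvWalk d num - num) := by
  match hnum : d.get? num with
  | none =>
      rw [pvWalk_of_not_none d num (by simp [hnum])]
      simp [pvBase, hnum]
  | some (some v) =>
      rw [pvWalk_of_not_none d num (by simp [hnum])]
      simp [pvBase, hnum]
  | some none =>
      simp only [Option.isSome_some]
      set S := (d.items.filter
        (fun p => p.2 == (none : Option Int) && decide (num ≤ p.1))).map (·.1) with hS
      have hperm : (PySem.List.sorted S (fun x => x) false).Perm S :=
        PySem.List.sorted_perm S _ false
      have hle : (PySem.List.sorted S (fun x => x) false).Pairwise (· ≤ ·) := by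
        simpa using PySem.List.sorted_pairwise S (fun x => x)
      have hndS : (PySem.List.sorted S (fun x => x) false).Nodup :=
        hperm.nodup_iff.mpr (pvNodup_filtered d num hnd)
      have hlt : (PySem.List.sorted S (fun x => x) false).Pairwise (· < ·) := by
        have := List.Pairwise.and hle hndS
        exact this.imp (fun h => lt_of_le_of_ne h.1 h.2)
      have hmem : ∀ k, k ∈ PySem.List.sorted S (fun x => x) false ↔
          (d.get? k = some none ∧ num ≤ k) := by
        intro k
        rw [PySem.List.mem_sorted]
        exact pvMem_filtered d num k hnd
      rw [fScanSorted_eq_walk d _ num hlt hmem]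
      simp [pvBase]

-- ===== VERDICT (by name: the statement is the Claim_ definition above) =====
theorem f_spec : Claim_equal_f := by
  intro m num _ hpre
  unfold Spec_f f f_alt
  have hnd : (PySem.Dict.mk m).keys.Nodup := by
    simpa [PySem.Dict.keys] using hpre
  rw [fAux_eq_walk]
  exact (f_alt_eq_walk (PySem.Dict.mk m) num hnd).symm
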